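-- pv_equiv track=rewrite | github.com/JostBrand/jsonshiatsu | jsonshiatsu/preprocessing/repairers.py | _fix_trailing_commas
-- ===== SOURCE A (Python) =====
-- def _fix_trailing_commas(text: str) -> str:
--     """Remove trailing commas before closing braces/brackets."""
--     # Need to be string-aware - don't process content inside strings
--     result = []
--     i = 0
--     in_string = False
--     string_char = None
--
--     while i < len(text):
--         char = text[i]
--
--         # Track string state
--         if not in_string and char in ['"', "'"]:
--             in_string = True
--             string_char = char
--             result.append(char)
--             i += 1
--             continue
--         if in_string and char == string_char:
--             # Check if quote is properly escaped
--             escape_count = 0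
--             j = i - 1
--             while j >= 0 and text[j] == "\\":
--                 escape_count += 1
--                 j -= 1
--
--             # If even number of backslashes, the quote is NOT escaped
--             if escape_count % 2 == 0:
--                 in_string = False
--                 string_char = None
--             result.append(char)
--             i += 1
--             continue
--
--         if in_string:
--             result.append(char)
--             i += 1
--             continue
--
--         # Only process trailing commas when not inside strings
--         # Look for pattern: comma whitespace closing_brace/bracket
--         if char == ",":
--             # Look ahead for closing brace/bracket
--             j = i + 1
--             while j < len(text) and text[j].isspace():
--                 j += 1
--
--             if j < len(text) and text[j] in "}]":
--                 # This is a trailing comma - skip it and the whitespace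
--                 i = j
--                 continue
--
--         result.append(char)
--         i += 1
--
--     return "".join(result)
-- ===== SOURCE B (Python) =====
-- def _fix_trailing_commas(text: str) -> str:
--     """Remove trailing commas before closing braces/brackets."""
--     # Single forward pass: a running escape flag replaces the backward
--     # backslash scan, and a small 'pending' buffer (comma + following
--     # whitespace) replaces the forward lookahead.
--     out = []
--     pending = []  # a comma and any whitespace after it, fate undecided
--     in_string = False
--     quote = None
--     escaped = False
--
--     for char in text:
--         if in_string:
--             out.append(char)
--             if escaped:
--                 escaped = False
--             elif char == "\\":
--                 escaped = True
--             elif char == quote: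
--                 in_string = False
--                 quote = None
--             continue
--
--         if pending and char.isspace():
--             pending.append(char)
--             continue
--         if char in "}]":
--             pending.clear()  # trailing comma: drop it and its whitespace
--         else:
--             out.extend(pending)  # not trailing after all: keep it
--             pending.clear()
--
--         if char == ",":
--             pending.append(char)
--         elif char in ['"', "'"]:
--             in_string = True
--             quote = char
--             escaped = False
--             out.append(char)
--         else:
--             out.append(char)
--
--     out.extend(pending)
--     return "".join(out)
-- ===== Notes on version B (the rewrite author's own statement) =====
-- stated objective: faster
-- what changed: Replaced the index-jumping while-loop with its backward backslash scan at every quote and its forward whitespace lookahead at every comma by a single forward for-loop that keeps a running escape flag and buffers an undecided comma-plus-whitespace run in a small pending list.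
import Mathlib
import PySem

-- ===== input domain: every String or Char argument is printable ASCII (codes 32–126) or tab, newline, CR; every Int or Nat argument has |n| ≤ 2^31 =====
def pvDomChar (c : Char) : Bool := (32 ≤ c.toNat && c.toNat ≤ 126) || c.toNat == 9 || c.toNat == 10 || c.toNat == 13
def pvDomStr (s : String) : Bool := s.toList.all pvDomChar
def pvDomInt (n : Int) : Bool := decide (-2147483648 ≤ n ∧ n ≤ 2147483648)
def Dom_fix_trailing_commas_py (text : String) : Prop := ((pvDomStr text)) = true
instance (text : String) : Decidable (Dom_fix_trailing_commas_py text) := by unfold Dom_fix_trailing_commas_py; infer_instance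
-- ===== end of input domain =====

-- B replaces A's backward backslash scan at quotes and forward whitespace lookahead at commas
-- by one forward pass with a running escape flag and a pending comma+whitespace buffer.

-- ===== PORT A =====
-- Python A's inner backward scan `while j >= 0 and text[j] == "\\"`: length of the
-- backslash run ending at index j
def escRun (l : List Char) : Nat → Nat
  | 0 => if l[0]? = some '\\' then 1 else 0
  | j + 1 => if l[j+1]? = some '\\' then escRun l j + 1 else 0

-- Python A's forward lookahead `while j < len(text) and text[j].isspace(): j += 1`
-- (fuel-guarded structural recursion; fuel = l.length always suffices)
def skipWS (l : List Char) : Nat → Nat → Nat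
  | 0, k => k
  | fuel+1, k =>
    if h : k < l.length then
      if PySem.Chars.isspace l[k] then skipWS l fuel (k + 1) else k
    else k

-- Python A's main `while i < len(text)` loop, branch for branch
-- (fuel-guarded structural recursion; each iteration advances i, so fuel = l.length suffices)
def loopA (l : List Char) : Nat → Nat → Bool → Option Char → List Char → List Char
  | 0, _, _, _, res => res
  | fuel+1, i, ins, sc, res =>
    if h : i < l.length then
      if ins = false ∧ (l[i] = '"' ∨ l[i] = '\'') then
        loopA l fuel (i+1) true (some l[i]) (res ++ [l[i]])
      else if ins = true ∧ some l[i] = sc then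
        if (if i = 0 then 0 else escRun l (i - 1)) % 2 = 0 then
          loopA l fuel (i+1) false none (res ++ [l[i]])
        else loopA l fuel (i+1) true sc (res ++ [l[i]])
      else if ins = true then
        loopA l fuel (i+1) ins sc (res ++ [l[i]])
      else if l[i] = ',' then
        if h2 : skipWS l l.length (i+1) < l.length then
          if l[skipWS l l.length (i+1)] = '}' ∨ l[skipWS l l.length (i+1)] = ']' then
            loopA l fuel (skipWS l l.length (i+1)) ins sc res
          else loopA l fuel (i+1) ins sc (res ++ [l[i]])
        else loopA l fuel (i+1) ins sc (res ++ [l[i]])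
      else loopA l fuel (i+1) ins sc (res ++ [l[i]])
    else res

def fix_trailing_commas_py (text : String) : String :=
  String.mk (loopA text.toList text.toList.length 0 false none [])

-- ===== PORT B =====
structure StB where
  out : List Char
  pending : List Char
  ins : Bool
  quote : Option Char
  esc : Bool
deriving Repr, DecidableEq

-- one step of B's single forward for-loop
def stepB (st : StB) (c : Char) : StB :=
  if st.ins then
    if st.esc then { st with out := st.out ++ [c], esc := false }
    else if c = '\\' then { st with out := st.out ++ [c], esc := true }
    else if some c = st.quote then { st with out := st.out ++ [c], ins := false, quote := none }
    else { st with out := st.out ++ [c] }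
  else if st.pending ≠ [] ∧ PySem.Chars.isspace c then
    { st with pending := st.pending ++ [c] }
  else
    let st1 := if c = '}' ∨ c = ']' then { st with pending := ([] : List Char) }
               else { st with out := st.out ++ st.pending, pending := ([] : List Char) }
    if c = ',' then { st1 with pending := [','] }
    else if c = '"' ∨ c = '\'' then
      { st1 with ins := true, quote := some c, esc := false, out := st1.out ++ [c] }
    else { st1 with out := st1.out ++ [c] }

def fix_trailing_commas_py_alt (text : String) : String :=
  let st := text.toList.foldl stepB ⟨[], [], false, none, false⟩
  String.mk (st.out ++ st.pending)

-- ===== PRECONDITION & SPEC =====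
def Spec_fix_trailing_commas_py (text : String) (out : String) : Prop := out = fix_trailing_commas_py_alt text
instance (text : String) (out : String) : Decidable (Spec_fix_trailing_commas_py text out) := by unfold Spec_fix_trailing_commas_py; infer_instance

-- ===== CLAIM (what is proved, stated in full; the proofs are below) =====
def Claim_equal_fix_trailing_commas_py : Prop := ∀ (text : String), Dom_fix_trailing_commas_py text → Spec_fix_trailing_commas_py text (fix_trailing_commas_py text)

-- ===== LEMMAS AND PROOFS =====

def finishB (st : StB) : List Char := st.out ++ st.pending

-- B's running escape flag, expressed from A's backward scan
def escAt (l : List Char) (i : Nat) (ins : Bool) : Bool :=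
  ins && decide (i ≠ 0) && decide (escRun l (i - 1) % 2 = 1)

@[simp] theorem escAt_false (l : List Char) (i : Nat) : escAt l i false = false := by
  simp [escAt]

theorem escAt_true_iff (l : List Char) (i : Nat) :
    escAt l i true = true ↔ i ≠ 0 ∧ escRun l (i - 1) % 2 = 1 := by
  simp [escAt]

theorem escAt_succ_true (l : List Char) (i : Nat) :
    escAt l (i+1) true = decide (escRun l i % 2 = 1) := by
  simp [escAt]

theorem escRun_of_ne {l : List Char} {i : Nat} (h : l[i]? ≠ some '\\') :
    escRun l i = 0 := by
  cases i <;> simp [escRun, h]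

theorem escRun_of_bs {l : List Char} {i : Nat} (h : l[i]? = some '\\') :
    escRun l i = (if i = 0 then 0 else escRun l (i - 1)) + 1 := by
  cases i <;> simp [escRun, h]

theorem isspace_ne {c : Char} (h : PySem.Chars.isspace c = true) :
    c ≠ '"' ∧ c ≠ '\'' ∧ c ≠ ',' ∧ c ≠ '}' ∧ c ≠ ']' := by
  refine ⟨?_, ?_, ?_, ?_, ?_⟩ <;> (rintro rfl; exact absurd h (by decide))

theorem skipWS_spec (l : List Char) : ∀ (f k : Nat), k ≤ l.length → l.length - k ≤ f →
    k ≤ skipWS l f k ∧ skipWS l f k ≤ l.length ∧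
    (∀ m, k ≤ m → m < skipWS l f k → PySem.Chars.isspace (l.getD m ' ') = true) ∧
    (∀ _ : skipWS l f k < l.length, PySem.Chars.isspace (l.getD (skipWS l f k) ' ') = false) := by
  intro f
  induction f with
  | zero =>
    intro k hk hf
    exact ⟨le_refl _, hk, by intro m h1 h2; simp [skipWS] at h2; omega,
      by intro h'; simp [skipWS] at h'; omega⟩
  | succ f ih =>
    intro k hk hf
    simp only [skipWS]
    split
    case isTrue h =>
      split
      case isTrue hsp =>
        obtain ⟨ih1, ih2, ih3, ih4⟩ := ih (k+1) (by omega) (by omega)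
        refine ⟨by omega, ih2, ?_, ih4⟩
        intro m hm1 hm2
        rcases Nat.eq_or_lt_of_le hm1 with heq | hlt
        · subst heq
          rw [List.getD_eq_getElem l ' ' h]
          exact hsp
        · exact ih3 m hlt hm2
      case isFalse hsp =>
        refine ⟨le_refl _, by omega, by intro m h1 h2; omega, ?_⟩
        intro h'
        rw [List.getD_eq_getElem l ' ' h]
        exact Bool.not_eq_true _ ▸ (by simpa using hsp)
    case isFalse h =>
      exact ⟨le_refl _, by omega, by intro m h1 h2; omega, by intro h'; exact absurd h' h⟩

-- branch lemmas for loopA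
theorem loopA_done {l : List Char} {i : Nat} (fuel : Nat) (ins : Bool) (sc : Option Char)
    (res : List Char) (h : ¬ i < l.length) : loopA l fuel i ins sc res = res := by
  cases fuel with
  | zero => rfl
  | succ f => simp only [loopA]; rw [dif_neg h]

theorem loopA_quote {l : List Char} {i : Nat} (fuel : Nat) (sc : Option Char) (res : List Char)
    (h : i < l.length) (hq : l[i] = '"' ∨ l[i] = '\'') :
    loopA l (fuel+1) i false sc res = loopA l fuel (i+1) true (some l[i]) (res ++ [l[i]]) := by
  simp only [loopA]
  rw [dif_pos h, if_pos ⟨trivial, hq⟩]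

theorem loopA_close {l : List Char} {i : Nat} (fuel : Nat) (sc : Option Char) (res : List Char)
    (h : i < l.length) (hsc : some l[i] = sc)
    (hev : (if i = 0 then 0 else escRun l (i - 1)) % 2 = 0) :
    loopA l (fuel+1) i true sc res = loopA l fuel (i+1) false none (res ++ [l[i]]) := by
  simp only [loopA]
  rw [dif_pos h, if_neg (by simp), if_pos ⟨trivial, hsc⟩, if_pos hev]

theorem loopA_stay {l : List Char} {i : Nat} (fuel : Nat) (sc : Option Char) (res : List Char)
    (h : i < l.length) (hsc : some l[i] = sc)
    (hodd : ¬ (if i = 0 then 0 else escRun l (i - 1)) % 2 = 0) :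
    loopA l (fuel+1) i true sc res = loopA l fuel (i+1) true sc (res ++ [l[i]]) := by
  simp only [loopA]
  rw [dif_pos h, if_neg (by simp), if_pos ⟨trivial, hsc⟩, if_neg hodd]

theorem loopA_instr {l : List Char} {i : Nat} (fuel : Nat) (sc : Option Char) (res : List Char)
    (h : i < l.length) (hsc : ¬ some l[i] = sc) :
    loopA l (fuel+1) i true sc res = loopA l fuel (i+1) true sc (res ++ [l[i]]) := by
  simp only [loopA]
  rw [dif_pos h, if_neg (by simp), if_neg (by simp [hsc]), if_pos trivial]

theorem loopA_comma_close {l : List Char} {i : Nat} (fuel : Nat) (sc : Option Char) (res : List Char)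
    (h : i < l.length) (hcm : l[i] = ',')
    (h2 : skipWS l l.length (i+1) < l.length)
    (hclo : l[skipWS l l.length (i+1)] = '}' ∨ l[skipWS l l.length (i+1)] = ']') :
    loopA l (fuel+1) i false sc res = loopA l fuel (skipWS l l.length (i+1)) false sc res := by
  simp only [loopA]
  rw [dif_pos h, if_neg (by simp only [hcm]; decide), if_neg (by simp),
      if_neg (by simp), if_pos hcm, dif_pos h2, if_pos hclo]

theorem loopA_comma_keep {l : List Char} {i : Nat} (fuel : Nat) (sc : Option Char) (res : List Char)
    (h : i < l.length) (hcm : l[i] = ',')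
    (hk : ∀ h2 : skipWS l l.length (i+1) < l.length,
          ¬(l[skipWS l l.length (i+1)] = '}' ∨ l[skipWS l l.length (i+1)] = ']')) :
    loopA l (fuel+1) i false sc res = loopA l fuel (i+1) false sc (res ++ [l[i]]) := by
  simp only [loopA]
  rw [dif_pos h, if_neg (by simp only [hcm]; decide), if_neg (by simp), if_neg (by simp),
      if_pos hcm]
  by_cases h2 : skipWS l l.length (i+1) < l.length
  · rw [dif_pos h2, if_neg (hk h2)]
  · rw [dif_neg h2]

theorem loopA_other {l : List Char} {i : Nat} (fuel : Nat) (sc : Option Char) (res : List Char)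
    (h : i < l.length) (hq : ¬(l[i] = '"' ∨ l[i] = '\'')) (hcm : ¬ l[i] = ',') :
    loopA l (fuel+1) i false sc res = loopA l fuel (i+1) false sc (res ++ [l[i]]) := by
  simp only [loopA]
  rw [dif_pos h, if_neg (by simp [hq]), if_neg (by simp), if_neg (by simp), if_neg hcm]

-- A appends a run of whitespace one char at a time
theorem loopA_ws (l : List Char) (d : Nat) : ∀ (k f : Nat) (res : List Char),
    d ≤ f → k + d ≤ l.length →
    (∀ m, k ≤ m → m < k + d → PySem.Chars.isspace (l.getD m ' ') = true) →
    loopA l f k false none res = loopA l (f - d) (k + d) false none (res ++ (l.drop k).take d) := by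
  induction d with
  | zero => intro k f res _ _ _; simp
  | succ d ih =>
    intro k f res hdf hlen hsp
    obtain ⟨f', rfl⟩ : ∃ f', f = f' + 1 := ⟨f - 1, by omega⟩
    have hk : k < l.length := by omega
    have hc : PySem.Chars.isspace l[k] = true := by
      have := hsp k (le_refl k) (by omega)
      rwa [List.getD_eq_getElem l ' ' hk] at this
    obtain ⟨h1, h2, h3, _, _⟩ := isspace_ne hc
    rw [loopA_other f' none res hk (by simp [h1, h2]) h3]
    rw [ih (k+1) f' (res ++ [l[k]]) (by omega) (by omega)
        (by intro m hm1 hm2; exact hsp m (by omega) (by omega))]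
    have e1 : k + 1 + d = k + (d + 1) := by omega
    have e2 : f' - d = f' + 1 - (d + 1) := by omega
    rw [e1, e2]
    conv_rhs => rw [List.drop_eq_getElem_cons hk, List.take_succ_cons,
      ← List.singleton_append, ← List.append_assoc]

-- B accumulates whitespace into a nonempty pending buffer
theorem foldB_ws (l : List Char) (d : Nat) : ∀ (k : Nat) (st : StB),
    st.ins = false → st.pending ≠ [] → k + d ≤ l.length →
    (∀ m, k ≤ m → m < k + d → PySem.Chars.isspace (l.getD m ' ') = true) →
    List.foldl stepB st ((l.drop k).take d) = { st with pending := st.pending ++ (l.drop k).take d } := by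
  induction d with
  | zero => intro k st _ _ _ _; cases st; simp
  | succ d ih =>
    intro k st hins hp hlen hsp
    have hk : k < l.length := by omega
    have hc : PySem.Chars.isspace l[k] = true := by
      have := hsp k (le_refl k) (by omega)
      rwa [List.getD_eq_getElem l ' ' hk] at this
    rw [List.drop_eq_getElem_cons hk, List.take_succ_cons, List.foldl_cons]
    have hstep : stepB st l[k] = { st with pending := st.pending ++ [l[k]] } := by
      simp [stepB, hins, hp, hc]
    rw [hstep]
    rw [ih (k+1) _ (by simpa using hins) (by simp) (by omega)
        (by intro m hm1 hm2; exact hsp m (by omega) (by omega))]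
    cases st; simp

-- flushing the pending buffer before a non-space, non-closer character commutes with the step
theorem stepB_flush (st : StB) (c : Char) (hins : st.ins = false)
    (hsp : PySem.Chars.isspace c = false) (hcl : ¬(c = '}' ∨ c = ']')) :
    stepB st c = stepB { st with out := st.out ++ st.pending, pending := [] } c := by
  cases st with
  | mk out pending ins quote esc =>
    simp only at hins
    subst hins
    simp only [stepB, hsp, hcl]
    split_ifs <;> simp_all

theorem main_inv (l : List Char) : ∀ (n fuel i : Nat) (ins : Bool) (sc : Option Char) (res : List Char),
    l.length - i ≤ n →
    l.length - i ≤ fuel →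
    (ins = true → sc = some '"' ∨ sc = some '\'') →
    (ins = false → sc = none) →
    loopA l fuel i ins sc res = finishB (List.foldl stepB ⟨res, [], ins, sc, escAt l i ins⟩ (l.drop i)) := by
  intro n
  induction n with
  | zero =>
    intro fuel i ins sc res hn _ _ _
    have hi : l.length ≤ i := by omega
    rw [loopA_done fuel ins sc res (by omega), List.drop_eq_nil_of_le hi]
    simp [finishB]
  | succ n ih =>
    intro fuel i ins sc res hn hf hq hsc
    by_cases h : i < l.length
    case neg =>
      rw [loopA_done fuel ins sc res h, List.drop_eq_nil_of_le (by omega)]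
      simp [finishB]
    case pos =>
    obtain ⟨g, rfl⟩ : ∃ g, fuel = g + 1 := ⟨fuel - 1, by omega⟩
    rw [List.drop_eq_getElem_cons h, List.foldl_cons]
    cases ins with
    | true =>
      obtain ⟨q, hq2, hqq⟩ : ∃ q, sc = some q ∧ (q = '"' ∨ q = '\'') := by
        rcases hq rfl with h' | h' <;> exact ⟨_, h', by simp⟩
      subst hq2
      have hqbs : q ≠ '\\' := by rcases hqq with rfl | rfl <;> decide
      have hihq : (true = true → some q = some '"' ∨ some q = some '\'') := by
        intro _; rcases hqq with rfl | rfl <;> simp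
      by_cases hcq : l[i] = q
      · by_cases hesc : escAt l i true = true
        · -- escaped quote: A stays inside the string
          have hodd : ¬ (if i = 0 then 0 else escRun l (i - 1)) % 2 = 0 := by
            obtain ⟨hi0, hpar⟩ := (escAt_true_iff l i).mp hesc
            simp only [if_neg hi0]
            omega
          rw [loopA_stay g (some q) res h (by rw [hcq]) hodd]
          have henext : escAt l (i+1) true = false := by
            have h0 : escRun l i = 0 :=
              escRun_of_ne (by simp [List.getElem?_eq_getElem h, hcq, hqbs])
            rw [escAt_succ_true, h0]
            simp
          have hstep : stepB ⟨res, [], true, some q, escAt l i true⟩ l[i]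
              = ⟨res ++ [l[i]], [], true, some q, escAt l (i+1) true⟩ := by
            rw [henext]; simp [stepB, hesc]
          rw [hstep]
          exact ih g (i+1) true (some q) (res ++ [l[i]]) (by omega) (by omega) hihq (by simp)
        · -- unescaped quote: the string closes
          have hef : escAt l i true = false := by rwa [Bool.not_eq_true] at hesc
          have hnot : ¬ (i ≠ 0 ∧ escRun l (i - 1) % 2 = 1) := by
            rw [← escAt_true_iff]; exact hesc
          have hev : (if i = 0 then 0 else escRun l (i - 1)) % 2 = 0 := by
            by_cases hi0 : i = 0
            · simp [hi0]
            · simp only [if_neg hi0]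
              have := fun hp => hnot ⟨hi0, hp⟩
              omega
          rw [loopA_close g (some q) res h (by rw [hcq]) hev]
          have hstep : stepB ⟨res, [], true, some q, escAt l i true⟩ l[i]
              = ⟨res ++ [l[i]], [], false, none, escAt l (i+1) false⟩ := by
            rw [hef]
            simp [stepB, hcq, hqbs]
          rw [hstep]
          exact ih g (i+1) false none (res ++ [l[i]]) (by omega) (by omega) (by simp) (by simp)
      · -- ordinary character inside the string
        rw [loopA_instr g (some q) res h (by simp [hcq])]
        by_cases hesc : escAt l i true = true
        · have hi0 : i ≠ 0 ∧ escRun l (i - 1) % 2 = 1 := by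
            unfold escAt at hesc
            simpa using hesc
          have henext : escAt l (i+1) true = false := by
            unfold escAt
            by_cases hbs : l[i] = '\\'
            · have hbr := escRun_of_bs (l := l) (i := i)
                (by simp [List.getElem?_eq_getElem h, hbs])
              simp only [Nat.add_sub_cancel, hbr, if_neg hi0.1]
              have := hi0.2
              simp only [Bool.true_and, Bool.and_eq_false_iff, decide_eq_false_iff_not]
              right
              omega
            · have h0 := escRun_of_ne (l := l) (i := i)
                (by simp [List.getElem?_eq_getElem h, hbs])
              simp [h0]
          have hstep : stepB ⟨res, [], true, some q, escAt l i true⟩ l[i]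
              = ⟨res ++ [l[i]], [], true, some q, escAt l (i+1) true⟩ := by
            rw [henext]; simp [stepB, hesc]
          rw [hstep]
          exact ih g (i+1) true (some q) (res ++ [l[i]]) (by omega) (by omega) hihq (by simp)
        · have hef : escAt l i true = false := by rwa [Bool.not_eq_true] at hesc
          by_cases hbs : l[i] = '\\'
          · have henext : escAt l (i+1) true = true := by
              unfold escAt
              have hbr := escRun_of_bs (l := l) (i := i)
                (by simp [List.getElem?_eq_getElem h, hbs])
              unfold escAt at hef
              simp only [Bool.true_and, Bool.and_eq_false_iff, decide_eq_false_iff_not,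
                not_not] at hef
              simp only [Nat.add_sub_cancel, hbr, Bool.true_and, Bool.and_eq_true,
                decide_eq_true_eq]
              constructor
              · omega
              · by_cases hi0 : i = 0
                · simp [hi0]
                · simp only [if_neg hi0]
                  rcases hef with h' | h'
                  · exact absurd hi0 (by simpa using h')
                  · omega
            have hstep : stepB ⟨res, [], true, some q, escAt l i true⟩ l[i]
                = ⟨res ++ [l[i]], [], true, some q, escAt l (i+1) true⟩ := by
              rw [henext, hef]; simp [stepB, hbs]
            rw [hstep]
            exact ih g (i+1) true (some q) (res ++ [l[i]]) (by omega) (by omega) hihq (by simp)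
          · have henext : escAt l (i+1) true = false := by
              unfold escAt
              have h0 := escRun_of_ne (l := l) (i := i)
                (by simp [List.getElem?_eq_getElem h, hbs])
              simp [h0]
            have hstep : stepB ⟨res, [], true, some q, escAt l i true⟩ l[i]
                = ⟨res ++ [l[i]], [], true, some q, escAt l (i+1) true⟩ := by
              rw [henext, hef]
              simp [stepB, hbs, hcq]
            rw [hstep]
            exact ih g (i+1) true (some q) (res ++ [l[i]]) (by omega) (by omega) hihq (by simp)
    | false =>
      have hsc' : sc = none := hsc rfl
      subst hsc'
      rw [escAt_false]
      by_cases hcq : l[i] = '"' ∨ l[i] = '\''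
      · -- a string opens
        rw [loopA_quote g none res h hcq]
        have hncl : ¬(l[i] = '}' ∨ l[i] = ']') := by
          rcases hcq with h' | h' <;> simp [h']
        have hncm : l[i] ≠ ',' := by
          rcases hcq with h' | h' <;> simp [h']
        have hstep : stepB ⟨res, [], false, none, false⟩ l[i]
            = ⟨res ++ [l[i]], [], true, some l[i], escAt l (i+1) true⟩ := by
          have henext : escAt l (i+1) true = false := by
            have h0 : escRun l i = 0 := escRun_of_ne (by
              simp only [List.getElem?_eq_getElem h]
              rcases hcq with h' | h' <;> simp [h'])
            rw [escAt_succ_true, h0]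
            simp
          rw [henext]
          simp [stepB, hncl, hncm, hcq]
        rw [hstep]
        exact ih g (i+1) true (some l[i]) (res ++ [l[i]]) (by omega) (by omega)
          (by intro _; rcases hcq with h' | h' <;> simp [h']) (by simp)
      · by_cases hcm : l[i] = ','
        · -- the interesting case: a comma outside strings
          obtain ⟨hj1, hj2, hj3, hj4⟩ := skipWS_spec l l.length (i+1) (by omega) (by omega)
          have hstep1 : stepB ⟨res, [], false, none, false⟩ l[i]
              = ⟨res, [','], false, none, false⟩ := by
            simp [stepB, hcm]
          rw [hstep1]
          have hdd : (l.drop (i+1)).drop (skipWS l l.length (i+1) - (i+1)) = l.drop (skipWS l l.length (i+1)) := by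
            rw [List.drop_drop]
            congr 1
            omega
          have hseg : l.drop (i+1)
              = (l.drop (i+1)).take (skipWS l l.length (i+1) - (i+1)) ++ l.drop (skipWS l l.length (i+1)) := by
            conv_lhs => rw [← List.take_append_drop (skipWS l l.length (i+1) - (i+1)) (l.drop (i+1))]
            rw [hdd]
          rw [hseg, List.foldl_append]
          have hws := foldB_ws l (skipWS l l.length (i+1) - (i+1)) (i+1) ⟨res, [','], false, none, false⟩
            rfl (by simp) (by omega)
            (by intro m hm1 hm2; exact hj3 m hm1 (by omega))
          rw [hws]
          by_cases hjl : skipWS l l.length (i+1) < l.length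
          · have hstop : PySem.Chars.isspace l[skipWS l l.length (i+1)] = false := by
              have := hj4 hjl
              rwa [List.getD_eq_getElem l ' ' hjl] at this
            rw [List.drop_eq_getElem_cons hjl, List.foldl_cons]
            by_cases hclo : l[skipWS l l.length (i+1)] = '}' ∨ l[skipWS l l.length (i+1)] = ']'
            · -- trailing comma: A jumps to the closer, B drops its pending buffer
              rw [loopA_comma_close g none res h hcm hjl hclo]
              have hstep2 : stepB { StB.mk res [','] false none false with
                    pending := [','] ++ (l.drop (i+1)).take (skipWS l l.length (i+1) - (i+1)) }
                    l[skipWS l l.length (i+1)]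
                  = ⟨res ++ [l[skipWS l l.length (i+1)]], [], false, none, false⟩ := by
                rcases hclo with h' | h' <;> (rw [h'] at hstop; simp [stepB, hstop, h'])
              rw [hstep2]
              obtain ⟨g', rfl⟩ : ∃ g', g = g' + 1 := ⟨g - 1, by omega⟩
              have hAstep : loopA l (g' + 1) (skipWS l l.length (i+1)) false none res
                  = loopA l g' (skipWS l l.length (i+1) + 1) false none (res ++ [l[skipWS l l.length (i+1)]]) := by
                refine loopA_other g' none res hjl ?_ ?_
                · rcases hclo with h' | h' <;> simp [h']
                · rcases hclo with h' | h' <;> simp [h']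
              rw [hAstep]
              have H := ih g' (skipWS l l.length (i+1) + 1) false none
                (res ++ [l[skipWS l l.length (i+1)]]) (by omega) (by omega) (by simp) (by simp)
              rw [escAt_false] at H
              exact H
            · -- comma kept: A re-walks the whitespace, B flushes its pending buffer
              rw [loopA_comma_keep g none res h hcm (fun _ => hclo)]
              have hA := loopA_ws l (skipWS l l.length (i+1) - (i+1)) (i+1) g (res ++ [l[i]])
                (by omega) (by omega) (by intro m hm1 hm2; exact hj3 m hm1 (by omega))
              have e1 : i + 1 + (skipWS l l.length (i+1) - (i+1)) = skipWS l l.length (i+1) := by omega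
              rw [e1] at hA
              rw [hA]
              have H := ih (g - (skipWS l l.length (i+1) - (i+1))) (skipWS l l.length (i+1)) false none
                (res ++ [l[i]] ++ (l.drop (i+1)).take (skipWS l l.length (i+1) - (i+1)))
                (by omega) (by omega) (by simp) (by simp)
              rw [escAt_false] at H
              rw [H]
              rw [List.drop_eq_getElem_cons hjl]
              simp only [List.foldl_cons]
              rw [stepB_flush _ _ rfl hstop hclo]
              congr 2
              simp [hcm]
              exact (stepB_flush ⟨res, ',' :: (l.drop (i+1)).take (skipWS l l.length (i+1) - (i+1)), false, none, false⟩ _ rfl hstop hclo).symm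
          · -- comma then whitespace to the very end of the text
            rw [loopA_comma_keep g none res h hcm (fun h2 => absurd h2 hjl)]
            have hA := loopA_ws l (skipWS l l.length (i+1) - (i+1)) (i+1) g (res ++ [l[i]])
              (by omega) (by omega) (by intro m hm1 hm2; exact hj3 m hm1 (by omega))
            have e1 : i + 1 + (skipWS l l.length (i+1) - (i+1)) = skipWS l l.length (i+1) := by omega
            rw [e1] at hA
            have hnil : List.drop (skipWS l l.length (i+1)) l = [] := List.drop_eq_nil_of_le (by omega)
            rw [hA, loopA_done _ false none _ hjl, hnil]
            simp [finishB, hcm]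
        · -- any other character outside strings
          rw [loopA_other g none res h hcq hcm]
          have hstep : stepB ⟨res, [], false, none, false⟩ l[i]
              = ⟨res ++ [l[i]], [], false, none, false⟩ := by
            by_cases hclo : l[i] = '}' ∨ l[i] = ']' <;>
              simp [stepB, hclo, hcq, hcm]
          rw [hstep]
          have H := ih g (i+1) false none (res ++ [l[i]]) (by omega) (by omega) (by simp) (by simp)
          rw [escAt_false] at H
          exact H

-- ===== VERDICT (by name: the statement is the Claim_ definition above) =====
theorem fix_trailing_commas_py_spec : Claim_equal_fix_trailing_commas_py := by
  intro text _
  unfold Spec_fix_trailing_commas_py fix_trailing_commas_py fix_trailing_commas_py_alt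
  have H := main_inv text.toList text.toList.length text.toList.length 0 false none []
    (by omega) (by omega) (by simp) (fun _ => rfl)
  rw [escAt_false] at H
  simp only [List.drop_zero] at H
  rw [H]
  simp [finishB]
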